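-- pv_equiv track=rewrite | github.com/FDULeolu/CS61A | disc.py | check_mountain_number
-- ===== SOURCE A (Python) =====
-- def check_mountain_number(n):
--     """
--     >>> check_mountain_number(103)
--     False
--     >>> check_mountain_number(153)
--     True
--     >>> check_mountain_number(123456)
--     True
--     >>> check_mountain_number(2345986)
--     True
--     """
--     digit_list = [int(x) for x in str(n)]
--     if len(digit_list) <= 2:
--         return True
--     is_up = True
--     index = 0
--     while is_up:
--         if index == len(digit_list) - 1:
--             return True
--         elif digit_list[index] < digit_list[index + 1]:
--             index += 1
--             continue
--         else:
--             is_up = False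
--     while not is_up:
--         if index == len(digit_list) - 1:
--             return True
--         elif digit_list[index] > digit_list[index + 1]:
--             index += 1
--             continue
--         else:
--             return False
-- ===== SOURCE B (Python) =====
-- def check_mountain_number(n):
--     digits = [int(x) for x in str(n)]
--     if len(digits) <= 2:
--         return True
--     peak = digits.index(max(digits))
--     return all(digits[i] < digits[i+1] for i in range(peak)) and \
--            all(digits[i] > digits[i+1] for i in range(peak, len(digits) - 1))
-- ===== Notes on version B (the rewrite author's own statement) =====
-- stated objective: simpler
-- what changed: Replaced A's two chained state-switching while loops over a mutable index with a find-the-peak-then-verify decomposition: locate the first index of the maximum digit and check the prefix strictly increases and the suffix strictly decreases.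
import Mathlib
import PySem

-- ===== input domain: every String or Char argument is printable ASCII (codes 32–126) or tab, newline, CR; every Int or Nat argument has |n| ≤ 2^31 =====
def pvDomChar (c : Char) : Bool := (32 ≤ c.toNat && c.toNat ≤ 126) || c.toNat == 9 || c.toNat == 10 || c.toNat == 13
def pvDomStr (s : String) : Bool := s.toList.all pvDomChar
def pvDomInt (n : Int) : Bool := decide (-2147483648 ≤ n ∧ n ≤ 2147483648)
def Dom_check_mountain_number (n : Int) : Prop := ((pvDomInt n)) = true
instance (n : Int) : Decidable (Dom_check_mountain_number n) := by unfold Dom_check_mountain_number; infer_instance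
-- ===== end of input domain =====

-- B replaces A's two chained state-switching while loops by "find the first index of the
-- maximal digit, then verify the prefix strictly rises and the suffix strictly falls"
-- (objective: simpler decomposition; same linear cost).

-- ===== PORT A =====
-- digit_list = [int(x) for x in str(n)]  (shared by both ports, identical line in both Pythons);
-- int(x) = PySem.Int.ofChars? [c]; the .getD 0 is only reached when int(x) raises (n < 0), outside Pre_.
def pvDigits (n : Int) : List Int :=
  (PySem.Int.toChars n).map (fun c => (PySem.Int.ofChars? [c]).getD 0)

-- second while loop: `while not is_up` (indices are in range whenever read; getD 0 is Python's d[i])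
def pvDown (d : List Int) (i : Nat) : Bool :=
  if _h1 : i = d.length - 1 then true
  else if _h2 : d.getD (i+1) 0 < d.getD i 0 then pvDown d (i+1)
  else false
termination_by d.length - i
decreasing_by
  by_cases h : i < d.length
  · omega
  · exfalso
    rw [List.getD_eq_default, List.getD_eq_default] at _h2 <;> omega

-- first while loop: `while is_up`; leaving it with is_up = False enters the second loop at the same index
def pvUp (d : List Int) (i : Nat) : Bool :=
  if _h1 : i = d.length - 1 then true
  else if _h2 : d.getD i 0 < d.getD (i+1) 0 then pvUp d (i+1)
  else pvDown d i
termination_by d.length - i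
decreasing_by
  by_cases h : i < d.length
  · omega
  · exfalso
    rw [List.getD_eq_default, List.getD_eq_default] at _h2 <;> omega

def check_mountain_number (n : Int) : Bool :=
  let digit_list := pvDigits n
  if digit_list.length ≤ 2 then true
  else pvUp digit_list 0

-- ===== PORT B =====
-- peak = digits.index(max(digits))
def pvPeak (d : List Int) : Nat :=
  ((PySem.List.index? d ((PySem.List.max? d (fun x => x)).getD 0)).getD 0)

def check_mountain_number_alt (n : Int) : Bool :=
  let digits := pvDigits n
  if digits.length ≤ 2 then true
  else
    let peak := pvPeak digits
    ((List.range peak).all fun i => decide (digits.getD i 0 < digits.getD (i+1) 0)) &&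
    ((List.range' peak (digits.length - 1 - peak)).all fun i =>
        decide (digits.getD (i+1) 0 < digits.getD i 0))

-- ===== PRECONDITION & SPEC =====
-- Pre_ excludes n < 0, where str(n) starts with '-' and int('-') raises ValueError in both A and B.
def Pre_check_mountain_number (n : Int) : Prop := 0 ≤ n
instance (n : Int) : Decidable (Pre_check_mountain_number n) := by
  unfold Pre_check_mountain_number; infer_instance

def pvWitness_check_mountain_number : Int := (153)

def Spec_check_mountain_number (n : Int) (out : Bool) : Prop := out = check_mountain_number_alt n
instance (n : Int) (out : Bool) : Decidable (Spec_check_mountain_number n out) := by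
  unfold Spec_check_mountain_number; infer_instance

-- ===== CLAIM (what is proved, stated in full; the proofs are below) =====
def Claim_equal_check_mountain_number : Prop :=
  ∀ (n : Int), Dom_check_mountain_number n → Pre_check_mountain_number n →
    Spec_check_mountain_number n (check_mountain_number n)

-- ===== LEMMAS AND PROOFS =====

-- "d strictly increases on indices [i, p)"
def pvIncOn (d : List Int) (i p : Nat) : Prop :=
  ∀ k, i ≤ k → k < p → d.getD k 0 < d.getD (k+1) 0

-- "d strictly decreases from index p to the end"
def pvDecFrom (d : List Int) (p : Nat) : Prop :=
  ∀ k, p ≤ k → k + 1 < d.length → d.getD (k+1) 0 < d.getD k 0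

lemma pvDown_iff (d : List Int) :
    ∀ m i, d.length - i = m → i < d.length →
      (pvDown d i = true ↔ pvDecFrom d i) := by
  intro m
  induction m with
  | zero => intro i hm hi; omega
  | succ m ih =>
    intro i hm hi
    rw [pvDown]
    by_cases h1 : i = d.length - 1
    · simp only [h1, dif_pos]
      constructor
      · intro _ k hk hk1; exfalso; omega
      · intro _; trivial
    · rw [dif_neg h1]
      by_cases h2 : d.getD (i+1) 0 < d.getD i 0
      · rw [dif_pos h2, ih (i+1) (by omega) (by omega)]
        constructor
        · intro h k hik hk1
          rcases Nat.eq_or_lt_of_le hik with rfl | hlt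
          · exact h2
          · exact h k hlt hk1
        · intro h k hik hk1; exact h k (by omega) hk1
      · rw [dif_neg h2]
        constructor
        · intro h; cases h
        · intro h; exact absurd (h i le_rfl (by omega)) h2

lemma pvUp_iff (d : List Int) :
    ∀ m i, d.length - i = m → i < d.length →
      (pvUp d i = true ↔ ∃ p, i ≤ p ∧ p < d.length ∧ pvIncOn d i p ∧ pvDecFrom d p) := by
  intro m
  induction m with
  | zero => intro i hm hi; omega
  | succ m ih =>
    intro i hm hi
    rw [pvUp]
    by_cases h1 : i = d.length - 1
    · simp only [h1, dif_pos]
      constructor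
      · intro _
        refine ⟨d.length - 1, le_rfl, by omega, ?_, ?_⟩
        · intro k hk hk'; exfalso; omega
        · intro k hk hk1; exfalso; omega
      · intro _; trivial
    · rw [dif_neg h1]
      by_cases h2 : d.getD i 0 < d.getD (i+1) 0
      · rw [dif_pos h2, ih (i+1) (by omega) (by omega)]
        constructor
        · rintro ⟨p, hip, hp, hinc, hdec⟩
          refine ⟨p, by omega, hp, ?_, hdec⟩
          intro k hik hkp
          rcases Nat.eq_or_lt_of_le hik with rfl | hlt
          · exact h2
          · exact hinc k hlt hkp
        · rintro ⟨p, hip, hp, hinc, hdec⟩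
          rcases Nat.eq_or_lt_of_le hip with heq | hlt
          · subst heq
            have := hdec i le_rfl (by omega)
            omega
          · exact ⟨p, hlt, hp, fun k hk hk' => hinc k (by omega) hk', hdec⟩
      · rw [dif_neg h2, pvDown_iff d (d.length - i) i rfl hi]
        constructor
        · intro h
          exact ⟨i, le_rfl, hi, fun k hk hk' => by omega, h⟩
        · rintro ⟨p, hip, hp, hinc, hdec⟩
          rcases Nat.eq_or_lt_of_le hip with rfl | hlt
          · exact hdec
          · exact absurd (hinc i le_rfl hlt) h2

-- chains: strict monotonicity propagates across the whole segment
lemma pvIncOn_chain (d : List Int) (i p : Nat) (h : pvIncOn d i p) :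
    ∀ a b, i ≤ a → a < b → b ≤ p → d.getD a 0 < d.getD b 0 := by
  intro a b ha hab hbp
  induction b with
  | zero => omega
  | succ b ihb =>
    rcases Nat.eq_or_lt_of_le (Nat.succ_le_of_lt hab) with hb | hb
    · rw [← hb]; exact h a ha (by omega)
    · exact lt_trans (ihb (by omega) (by omega)) (h b (by omega) (by omega))

lemma pvDecFrom_chain (d : List Int) (p : Nat) (h : pvDecFrom d p) :
    ∀ a b, p ≤ a → a < b → b < d.length → d.getD b 0 < d.getD a 0 := by
  intro a b ha hab hb
  induction b with
  | zero => omega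
  | succ b ihb =>
    rcases Nat.eq_or_lt_of_le (Nat.succ_le_of_lt hab) with hb' | hb'
    · rw [← hb']; exact h a ha (by omega)
    · exact lt_trans (h b (by omega) (by omega)) (ihb (by omega) (by omega))

-- at a mountain shape the peak index is the unique maximum, so pvPeak finds exactly it
lemma pvPeak_eq (d : List Int) (p : Nat) (hp : p < d.length)
    (huniq : ∀ j, j < d.length → j ≠ p → d.getD j 0 < d.getD p 0) :
    pvPeak d = p := by
  have hd : d ≠ [] := by intro h; rw [h] at hp; simp at hp
  obtain ⟨m, hm⟩ := Option.isSome_iff_exists.mp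
    (by rwa [Ne, ← PySem.List.max?_eq_none_iff (key := fun x : Int => x), ← Option.not_isSome_iff_eq_none, not_not] at hd)
  have hmem : m ∈ d := PySem.List.max?_mem hm
  have hmax : ∀ y ∈ d, y ≤ m := fun y hy => PySem.List.max?_isMax hm y hy
  have hpd : d.getD p 0 = d[p] := List.getD_eq_getElem d 0 hp
  have hpmem : d.getD p 0 ∈ d := by rw [hpd]; exact List.getElem_mem hp
  have hmp : m = d.getD p 0 := by
    obtain ⟨j, hj, hjm⟩ := List.mem_iff_getElem.mp hmem
    by_cases hjp : j = p
    · subst hjp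
      rw [List.getD_eq_getElem d 0 hj, hjm]
    · have h1 : d.getD j 0 < d.getD p 0 := huniq j hj hjp
      have h2 : d.getD p 0 ≤ m := hmax _ hpmem
      rw [List.getD_eq_getElem d 0 hj, hjm] at h1
      omega
  obtain ⟨k, hk⟩ := Option.isSome_iff_exists.mp ((PySem.List.index?_isSome_iff _ _).mpr hmem)
  obtain ⟨hkl, hkv, _⟩ := PySem.List.getElem_of_index?_eq_some hk
  have hkp : k = p := by
    by_contra hkp
    have := huniq k hkl hkp
    rw [List.getD_eq_getElem d 0 hkl, hkv, hmp] at this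
    omega
  subst hkp
  unfold pvPeak
  rw [hm, Option.getD_some, hk, Option.getD_some]

lemma pvAlt_iff (d : List Int) (hd : 0 < d.length) :
    ((((List.range (pvPeak d)).all fun i => decide (d.getD i 0 < d.getD (i+1) 0)) &&
      ((List.range' (pvPeak d) (d.length - 1 - pvPeak d)).all fun i =>
          decide (d.getD (i+1) 0 < d.getD i 0))) = true
     ↔ ∃ p, p < d.length ∧ pvIncOn d 0 p ∧ pvDecFrom d p) := by
  constructor
  · intro h
    rw [Bool.and_eq_true, List.all_eq_true, List.all_eq_true] at h
    obtain ⟨hpre, hsuf⟩ := h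
    -- pvPeak d < d.length since the max exists and index? finds it
    have hd' : d ≠ [] := by intro h; rw [h] at hd; simp at hd
    obtain ⟨m, hm⟩ := Option.isSome_iff_exists.mp
      (by rwa [Ne, ← PySem.List.max?_eq_none_iff (key := fun x : Int => x), ← Option.not_isSome_iff_eq_none, not_not] at hd')
    obtain ⟨k, hk⟩ := Option.isSome_iff_exists.mp
      ((PySem.List.index?_isSome_iff _ _).mpr (PySem.List.max?_mem hm))
    obtain ⟨hkl, _, _⟩ := PySem.List.getElem_of_index?_eq_some hk
    have hpk : pvPeak d = k := by unfold pvPeak; rw [hm, Option.getD_some, hk, Option.getD_some]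
    refine ⟨pvPeak d, by omega, ?_, ?_⟩
    · intro j hj hjp
      have := hpre j (List.mem_range.mpr hjp)
      exact of_decide_eq_true this
    · intro j hj hj1
      have := hsuf j (List.mem_range'_1.mpr ⟨hj, by omega⟩)
      exact of_decide_eq_true this
  · rintro ⟨p, hp, hinc, hdec⟩
    have huniq : ∀ j, j < d.length → j ≠ p → d.getD j 0 < d.getD p 0 := by
      intro j hj hjp
      rcases Nat.lt_or_ge j p with h | h
      · exact pvIncOn_chain d 0 p hinc j p (Nat.zero_le _) h le_rfl
      · exact pvDecFrom_chain d p hdec p j (le_rfl) (by omega) hj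
    rw [pvPeak_eq d p hp huniq, Bool.and_eq_true, List.all_eq_true, List.all_eq_true]
    constructor
    · intro j hj
      exact decide_eq_true (hinc j (Nat.zero_le _) (List.mem_range.mp hj))
    · intro j hj
      obtain ⟨h1, h2⟩ := List.mem_range'_1.mp hj
      exact decide_eq_true (hdec j h1 (by omega))

-- ===== VERDICT (by name: the statement is the Claim_ definition above) =====
theorem check_mountain_number_spec : Claim_equal_check_mountain_number := by
  intro n _ _
  unfold Spec_check_mountain_number check_mountain_number check_mountain_number_alt
  set d := pvDigits n with hd
  by_cases hlen : d.length ≤ 2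
  · simp [hlen]
  · simp only [hlen, if_false]
    have hpos : 0 < d.length := by omega
    rw [Bool.eq_iff_iff, pvUp_iff d d.length 0 (by omega) hpos, pvAlt_iff d hpos]
    constructor
    · rintro ⟨p, _, hp, hinc, hdec⟩; exact ⟨p, hp, hinc, hdec⟩
    · rintro ⟨p, hp, hinc, hdec⟩; exact ⟨p, Nat.zero_le _, hp, hinc, hdec⟩
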